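-- pv_equiv track=rewrite | github.com/matiszac/py-maze-solver | src/main.py | generate_cell_points
-- ===== SOURCE A (Python) =====
-- def generate_cell_points(x_cells, y_cells, cell_size, offset=4):
--     points = []
--     cell_points = []
--     for x in range(0, x_cells+1):
--         col = []
--         for y in range(0, y_cells+1):
--             col.append(((x * cell_size)+offset, (y * cell_size)+offset))
--         points.append(col)
--     for i in range(len(points)-1):
--         for p in range(len(points[i])-1):
--             cell_points.append((points[i][p], points[i+1][p+1]))
--     return cell_points
-- ===== SOURCE B (Python) =====
-- def generate_cell_points(x_cells, y_cells, cell_size, offset=4):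
--     cell_points = []
--     for x in range(x_cells):
--         for y in range(y_cells):
--             cell_points.append((
--                 ((x * cell_size) + offset, (y * cell_size) + offset),
--                 (((x + 1) * cell_size) + offset, ((y + 1) * cell_size) + offset),
--             ))
--     return cell_points
-- ===== Notes on version B (the rewrite author's own statement) =====
-- stated objective: simpler
-- what changed: B drops A's intermediate (x_cells+1)x(y_cells+1) corner-point grid and its second index-based pairing pass, computing each cell's two corner points directly in one fused double loop.
import Mathlib
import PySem

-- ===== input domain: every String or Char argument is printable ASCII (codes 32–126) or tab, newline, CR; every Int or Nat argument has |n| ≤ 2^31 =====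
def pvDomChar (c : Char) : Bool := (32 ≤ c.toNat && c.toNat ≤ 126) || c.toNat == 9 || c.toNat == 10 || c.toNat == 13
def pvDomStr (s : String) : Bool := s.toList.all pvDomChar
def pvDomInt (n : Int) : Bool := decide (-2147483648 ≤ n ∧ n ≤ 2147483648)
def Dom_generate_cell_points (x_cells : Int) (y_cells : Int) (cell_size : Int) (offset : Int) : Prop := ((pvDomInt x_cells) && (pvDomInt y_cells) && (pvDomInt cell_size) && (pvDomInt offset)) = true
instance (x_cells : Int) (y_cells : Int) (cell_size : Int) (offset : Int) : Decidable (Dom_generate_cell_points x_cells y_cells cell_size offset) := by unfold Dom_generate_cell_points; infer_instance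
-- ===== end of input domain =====

-- B replaces A's two-phase build-a-corner-grid-then-index strategy by one fused double
-- loop emitting each cell's corner pair directly (objective: simpler; same asymptotic cost).

-- ===== PORT A =====
-- A builds 'points', a grid of corner points, then pairs points[i][p] with points[i+1][p+1].
-- Python indexing points[i][p] is always in range here; pyGetD's default is never used.
def generate_cell_points (x_cells : Int) (y_cells : Int) (cell_size : Int) (offset : Int) : List ((Int × Int) × (Int × Int)) :=
  let points : List (List (Int × Int)) :=
    (PySem.List.pyRange 0 (x_cells + 1) 1).map (fun x =>
      (PySem.List.pyRange 0 (y_cells + 1) 1).map (fun y =>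
        ((x * cell_size) + offset, (y * cell_size) + offset)))
  (PySem.List.pyRange 0 ((points.length : Int) - 1) 1).foldl (fun acc i =>
    (PySem.List.pyRange 0 (((PySem.List.pyGetD points i []).length : Int) - 1) 1).foldl (fun acc p =>
      acc ++ [(PySem.List.pyGetD (PySem.List.pyGetD points i []) p (0, 0),
               PySem.List.pyGetD (PySem.List.pyGetD points (i + 1) []) (p + 1) (0, 0))]) acc) []

-- ===== PORT B =====
def generate_cell_points_alt (x_cells : Int) (y_cells : Int) (cell_size : Int) (offset : Int) : List ((Int × Int) × (Int × Int)) :=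
  (PySem.List.pyRange 0 x_cells 1).foldl (fun acc x =>
    (PySem.List.pyRange 0 y_cells 1).foldl (fun acc y =>
      acc ++ [(((x * cell_size) + offset, (y * cell_size) + offset),
               (((x + 1) * cell_size) + offset, ((y + 1) * cell_size) + offset))]) acc) []

-- ===== PRECONDITION & SPEC =====
def Spec_generate_cell_points (x_cells : Int) (y_cells : Int) (cell_size : Int) (offset : Int) (out : List ((Int × Int) × (Int × Int))) : Prop := out = generate_cell_points_alt x_cells y_cells cell_size offset
instance (x_cells : Int) (y_cells : Int) (cell_size : Int) (offset : Int) (out : List ((Int × Int) × (Int × Int))) : Decidable (Spec_generate_cell_points x_cells y_cells cell_size offset out) := by unfold Spec_generate_cell_points; infer_instance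

-- ===== CLAIM (what is proved, stated in full; the proofs are below) =====
def Claim_equal_generate_cell_points : Prop := ∀ (x_cells : Int) (y_cells : Int) (cell_size : Int) (offset : Int), Dom_generate_cell_points x_cells y_cells cell_size offset → Spec_generate_cell_points x_cells y_cells cell_size offset (generate_cell_points x_cells y_cells cell_size offset)

-- ===== LEMMAS AND PROOFS =====

theorem gcp_eq (x_cells y_cells cell_size offset : Int) :
    generate_cell_points x_cells y_cells cell_size offset
      = generate_cell_points_alt x_cells y_cells cell_size offset := by
  unfold generate_cell_points generate_cell_points_alt
  simp only [PySem.List.foldl_append_singleton_eq_map, PySem.List.foldl_append_eq_flatMap,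
    List.nil_append, List.length_map, PySem.List.length_pyRange_one]
  rcases Decidable.em (x_cells ≤ 0) with hx | hx
  · rw [PySem.List.pyRange_one_eq_nil (a := 0) (b := x_cells) hx,
        PySem.List.pyRange_one_eq_nil (a := 0) (b := (((x_cells + 1 - 0).toNat : Int) - 1)) (by omega)]
    simp
  · have hxn : ((x_cells + 1 - 0).toNat : Int) - 1 = x_cells := by omega
    rw [hxn]
    refine List.flatMap_congr ?_  -- pointwise equality on the outer range
    intro i hi
    rw [PySem.List.mem_pyRange_one] at hi
    rw [PySem.List.pyGetD_map_pyRange_of_nonneg _ _ _ _ hi.1 (by omega)]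
    simp only [List.length_map, PySem.List.length_pyRange_one]
    rcases Decidable.em (y_cells ≤ 0) with hy | hy
    · rw [PySem.List.pyRange_one_eq_nil (a := 0) (b := y_cells) hy,
          PySem.List.pyRange_one_eq_nil (a := 0) (b := (((y_cells + 1 - 0).toNat : Int) - 1)) (by omega)]
      simp
    · have hyn : ((y_cells + 1 - 0).toNat : Int) - 1 = y_cells := by omega
      rw [hyn]
      refine List.map_congr_left ?_
      intro p hp
      rw [PySem.List.mem_pyRange_one] at hp
      rw [PySem.List.pyGetD_map_pyRange_of_nonneg _ _ _ _ hp.1 (by omega),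
          PySem.List.pyGetD_map_pyRange_of_nonneg _ _ _ _ (by omega : (0:Int) ≤ i + 1) (by omega),
          PySem.List.pyGetD_map_pyRange_of_nonneg _ _ _ _ (by omega : (0:Int) ≤ p + 1) (by omega)]

-- ===== VERDICT (by name: the statement is the Claim_ definition above) =====
theorem generate_cell_points_spec : Claim_equal_generate_cell_points := by
  intro x y c o _
  unfold Spec_generate_cell_points
  exact gcp_eq x y c o
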